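-- pv_equiv track=rewrite | github.com/JayThibs/supervising-ais-improving-ais | src/behavioural_clustering/config/run_settings.py | process_reuse_data
-- ===== SOURCE A (Python) =====
-- def process_reuse_data(data_list, all_data_types):
--     """
--     Process the reuse_data list to determine which data types should be reused.
--
--     If "all" is in the data_list, it will add all data types to the set.
--     If an item in the data_list starts with "!", it will remove the corresponding data type from the set.
--     Otherwise, it will add the item to the set if it is in the all_data_types list.
--     """
--     data_types = set()
--     if "all" in data_list:
--         data_types = set(all_data_types)
--         for item in data_list:
--             if item.startswith("!"):
--                 exclude_type = item[1:]
--                 data_types.discard(exclude_type)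
--     else:
--         for item in data_list:
--             if item in all_data_types:
--                 data_types.add(item)
--     return data_types
-- ===== SOURCE B (Python) =====
-- def process_reuse_data(data_list, all_data_types):
--     """Single forward pass deciding inclusion per candidate: in the 'all' case walk
--     all_data_types and keep t unless its negation directive '!'+t occurs in data_list;
--     otherwise walk data_list and keep items found in all_data_types. Duplicates are
--     skipped via the output accumulator; no set copy or incremental discard."""
--     out = []
--     if "all" in data_list:
--         for t in all_data_types:
--             if t not in out and ("!" + t) not in data_list:
--                 out.append(t)
--     else:
--         for t in data_list:
--             if t not in out and t in all_data_types:
--                 out.append(t)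
--     return set(out)
-- ===== Notes on version B (the rewrite author's own statement) =====
-- stated objective: alternative
-- what changed: Instead of copying the full set and mutating it (discard per '!'-directive) or adding matches to a set, B makes one inclusion decision per candidate: in the 'all' case it walks all_data_types and keeps t unless the literal directive '!'+t occurs in data_list, deduplicating via the output accumulator; the other branch keeps data_list items found in all_data_types the same way.
import Mathlib
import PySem

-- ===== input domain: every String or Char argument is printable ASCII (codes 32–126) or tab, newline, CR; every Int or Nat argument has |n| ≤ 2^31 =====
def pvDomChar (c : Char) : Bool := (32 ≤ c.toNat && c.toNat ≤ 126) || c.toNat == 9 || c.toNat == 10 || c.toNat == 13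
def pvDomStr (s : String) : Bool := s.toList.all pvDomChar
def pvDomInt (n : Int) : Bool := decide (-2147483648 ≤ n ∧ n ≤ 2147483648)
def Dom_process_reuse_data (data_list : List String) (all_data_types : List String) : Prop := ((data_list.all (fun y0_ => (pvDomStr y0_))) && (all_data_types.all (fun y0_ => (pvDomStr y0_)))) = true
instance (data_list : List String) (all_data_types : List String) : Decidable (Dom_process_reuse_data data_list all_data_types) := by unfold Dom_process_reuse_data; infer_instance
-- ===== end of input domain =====

-- B decides inclusion per candidate in one forward pass (testing the literal '!'+t
-- directive / membership), deduplicating via the output accumulator, instead of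
-- copying the full set and mutating it; an alternative decomposition, not faster.


-- ===== PORT A =====
def process_reuse_data (data_list : List String) (all_data_types : List String) : List String :=
  if data_list.contains "all" then
    -- data_types = set(all_data_types); for item: if item.startswith("!"): data_types.discard(item[1:])
    data_list.foldl
      (fun data_types item =>
        if PySem.Str.startswith item "!" then
          PySem.Set.discard data_types (PySem.Str.slice item (some 1) none)
        else data_types)
      (PySem.Set.ofList all_data_types)
  else
    -- for item: if item in all_data_types: data_types.add(item)
    data_list.foldl
      (fun data_types item =>
        if all_data_types.contains item then PySem.Set.add data_types item else data_types)
      PySem.Set.empty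

-- ===== PORT B =====
def process_reuse_data_alt (data_list : List String) (all_data_types : List String) : List String :=
  PySem.Set.ofList
    (if data_list.contains "all" then
      all_data_types.foldl
        (fun out t =>
          if !out.contains t && !data_list.contains ("!" ++ t) then out ++ [t] else out) []
    else
      data_list.foldl
        (fun out t =>
          if !out.contains t && all_data_types.contains t then out ++ [t] else out) [])

-- ===== PRECONDITION & SPEC =====
def Spec_process_reuse_data (data_list : List String) (all_data_types : List String) (out : List String) : Prop := out = process_reuse_data_alt data_list all_data_types
instance (data_list : List String) (all_data_types : List String) (out : List String) : Decidable (Spec_process_reuse_data data_list all_data_types out) := by unfold Spec_process_reuse_data; infer_instance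

-- ===== CLAIM (what is proved, stated in full; the proofs are below) =====
def Claim_equal_process_reuse_data : Prop := ∀ (data_list : List String) (all_data_types : List String), Dom_process_reuse_data data_list all_data_types → Spec_process_reuse_data data_list all_data_types (process_reuse_data data_list all_data_types)

-- ===== LEMMAS AND PROOFS =====

lemma discard_eq_filter (s : List String) (x : String) :
    PySem.Set.discard s x = s.filter (fun y => !(y == x)) := rfl

-- folding discard over a list of keys is one big filter
lemma foldl_discard (f : String → String) (l : List String) (s : List String) :
    l.foldl (fun dt item => PySem.Set.discard dt (f item)) s
      = s.filter (fun y => !(l.map f).contains y) := by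
  induction l generalizing s with
  | nil => simp
  | cons a l ih =>
      simp only [List.foldl_cons, ih, List.map_cons]
      rw [discard_eq_filter, List.filter_filter]
      refine List.filter_congr fun y _ => ?_
      by_cases h : y = f a <;> simp [h]

-- ofList commutes with filter
lemma ofList_filter (q : String → Bool) (xs : List String) :
    PySem.Set.ofList (xs.filter q) = (PySem.Set.ofList xs).filter q := by
  induction xs with
  | nil => simp [PySem.Set.ofList_nil]
  | cons x xs ih =>
      by_cases hq : q x
      · rw [List.filter_cons_of_pos hq, PySem.Set.ofList_cons, PySem.Set.ofList_cons,
          List.filter_cons_of_pos hq, ih]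
        congr 1
        rw [discard_eq_filter, discard_eq_filter, List.filter_filter, List.filter_filter]
        exact List.filter_congr fun y _ => by rw [Bool.and_comm]
      · rw [List.filter_cons_of_neg hq, PySem.Set.ofList_cons,
          List.filter_cons_of_neg hq, ih]
        rw [discard_eq_filter, List.filter_filter]
        refine (List.filter_congr fun y _ => ?_).symm
        by_cases h : y = x
        · subst h; simp [hq]
        · simp [h]

-- B's accumulating loop with a seen-check is the filtered-ofList fold
lemma foldlB_eq_ofList_filter (p : String → Bool) (l : List String) :
    l.foldl (fun out t => if !out.contains t && p t then out ++ [t] else out) []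
      = PySem.Set.ofList (l.filter p) := by
  rw [PySem.Set.ofList_eq_foldl, ← PySem.List.foldl_if_eq_foldl_filter]
  apply List.foldl_ext
  intro acc t _
  by_cases hp : p t
  · simp [hp, PySem.Set.add, PySem.Set.contains]
  · simp [hp]

-- set(xs) is idempotent
lemma ofList_idem (s : List String) :
    PySem.Set.ofList (PySem.Set.ofList s) = PySem.Set.ofList s := by
  have h := PySem.Set.nodup_ofList (xs := s)
  generalize PySem.Set.ofList s = t at h ⊢
  induction t with
  | nil => rfl
  | cons a t ih =>
      rw [PySem.Set.ofList_cons, ih h.of_cons, discard_eq_filter]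
      have hfil : t.filter (fun y => !(y == a)) = t := by
        apply List.filter_eq_self.2
        intro y hy
        have hne : y ≠ a := fun hEq => (List.nodup_cons.1 h).1 (hEq ▸ hy)
        simp [hne]
      rw [hfil]

-- an exclusion directive '!'+y occurs in l iff y is among the stripped '!'-items
lemma contains_strip (l : List String) (y : String) :
    ((l.filter (fun i => PySem.Str.startswith i "!")).map
        (fun i => PySem.Str.slice i (some 1) none)).contains y
      = l.contains ("!" ++ y) := by
  rw [Bool.eq_iff_iff]
  simp only [List.contains_iff_mem, List.mem_map, List.mem_filter]
  constructor
  · rintro ⟨i, ⟨hi, hsw⟩, hsl⟩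
    have hpre : "!".toList <+: i.toList := by
      rw [← PySem.Chars.startswith_iff]
      simpa using hsw
    obtain ⟨r, hr⟩ := hpre
    have : ("!" ++ y).toList = i.toList := by
      have htl : (PySem.Str.slice i (some 1) none).toList = i.toList.tail := by
        simp [PySem.Str.toList_slice, PySem.List.slice_from_one]
      rw [String.toList_append, ← hr]
      simp [← hsl, htl, ← hr]
    have := String.toList_inj.mp this
    exact this ▸ hi
  · intro h
    refine ⟨"!" ++ y, ⟨h, ?_⟩, ?_⟩
    · have h2 : "!".toList <+: ("!" ++ y).toList := ⟨y.toList, by simp⟩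
      rw [← PySem.Chars.startswith_iff] at h2
      simpa using h2
    · apply String.toList_inj.mp
      simp [PySem.Str.toList_slice, PySem.List.slice_from_one]

-- ===== VERDICT (by name: the statement is the Claim_ definition above) =====
theorem process_reuse_data_spec : Claim_equal_process_reuse_data := by
  intro data_list all_data_types _
  unfold Spec_process_reuse_data process_reuse_data process_reuse_data_alt
  by_cases hall : data_list.contains "all"
  · simp only [hall, if_true]
    rw [← List.foldl_filter, foldl_discard, foldlB_eq_ofList_filter,
      ofList_idem, ofList_filter]
    refine List.filter_congr fun y _ => ?_
    rw [← contains_strip data_list y]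
  · simp only [hall, if_false, Bool.false_eq_true]
    rw [foldlB_eq_ofList_filter, ofList_idem, PySem.Set.ofList_eq_foldl,
      ← PySem.List.foldl_if_eq_foldl_filter,
      show (PySem.Set.empty : List String) = [] from rfl]
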